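-- pv_equiv track=rewrite | github.com/unaxiee/ICSBoM | util/package_repo_scraper.py | generate_prefix_variants
-- ===== SOURCE A (Python) =====
-- from typing import Set, Dict, List
--
-- def generate_prefix_variants(sanitized_name: str) -> Set[str]:
--     """Generate all possible prefix variants for a sanitized package name.
--
--     This function takes a package name where special characters have been replaced
--     with underscores and generates all possible variants by replacing underscores
--     with different separators (+, ., @, _).
--
--     Args:
--         sanitized_name (str): Package name with special characters replaced by underscores
--
--     Returns:
--         Set[str]: Set of all possible prefix variants
--     """
--     parts = sanitized_name.split('_')
--     variants = set()
--     def helper(i, path):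
--         if i == len(parts):
--             variants.add(''.join(path))
--             return
--         if i > 0:
--             for sep in ['+', '.', '@', '_']:
--                 helper(i + 1, path + [sep, parts[i]])
--         else:
--             helper(i + 1, [parts[i]])
--     helper(0, [])
--     return variants
-- ===== SOURCE B (Python) =====
-- from itertools import product
--
-- def generate_prefix_variants(sanitized_name: str):
--     """Generate all separator variants by enumerating the explicit product of
--     separators over the gaps between underscore-split parts (flat loop, no recursion)."""
--     parts = sanitized_name.split('_')
--     variants = set()
--     for seps in product(['+', '.', '@', '_'], repeat=len(parts) - 1):
--         s = parts[0]
--         for sep, part in zip(seps, parts[1:]):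
--             s += sep + part
--         variants.add(s)
--     return variants
-- ===== Notes on version B (the rewrite author's own statement) =====
-- stated objective: idiomatic
-- what changed: Replaced A's depth-first recursive helper that grows a path list with a single flat loop over the explicit itertools.product of separator tuples for the n-1 gaps, building each variant by joining parts with its separator tuple.
import Mathlib
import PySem

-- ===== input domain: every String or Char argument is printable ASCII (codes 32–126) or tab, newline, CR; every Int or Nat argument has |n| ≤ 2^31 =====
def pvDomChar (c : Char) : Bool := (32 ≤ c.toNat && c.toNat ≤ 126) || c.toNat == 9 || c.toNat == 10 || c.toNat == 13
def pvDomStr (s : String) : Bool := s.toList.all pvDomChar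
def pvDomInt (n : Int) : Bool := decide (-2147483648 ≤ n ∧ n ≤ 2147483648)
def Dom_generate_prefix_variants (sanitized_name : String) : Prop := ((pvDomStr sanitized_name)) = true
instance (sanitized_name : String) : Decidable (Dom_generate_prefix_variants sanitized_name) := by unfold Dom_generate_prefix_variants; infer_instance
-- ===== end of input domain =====

-- B replaces A's depth-first recursion over the gaps by one flat loop over the explicit
-- 4^(n-1) product of separator tuples (objective: idiomatic; same output set).

-- ===== PORT A =====
-- helper(i, path): recursion over the remaining parts; `variants.add` accumulates the set.
-- The Python `for sep in ['+', '.', '@', '_']` loop over the 4-element literal is unrolled.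
def pvHelperA : List String → List String → PySem.Set String → PySem.Set String
  | [], path, variants => PySem.Set.add variants (PySem.Str.join "" path)
  | part :: rest, path, variants =>
      pvHelperA rest (path ++ ["_", part])
        (pvHelperA rest (path ++ ["@", part])
          (pvHelperA rest (path ++ [".", part])
            (pvHelperA rest (path ++ ["+", part]) variants)))

def generate_prefix_variants (sanitized_name : String) : List String :=
  -- split? is `some` here since the separator "_" is nonempty
  let parts := (PySem.Str.split? sanitized_name "_").getD []
  match parts with
  | [] => pvHelperA [] [] PySem.Set.empty          -- i == len(parts) at i = 0
  | p0 :: rest => pvHelperA rest [p0] PySem.Set.empty   -- the i == 0 branch: helper(1, [parts[0]])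

-- ===== PORT B =====
-- itertools.product(['+', '.', '@', '_'], repeat=n) in Python's lexicographic order
def pvProduct4 : Nat → List (List String)
  | 0 => [[]]
  | n + 1 => ["+", ".", "@", "_"].flatMap (fun sep => (pvProduct4 n).map (fun t => sep :: t))

def generate_prefix_variants_alt (sanitized_name : String) : List String :=
  -- split? is `some` here since the separator "_" is nonempty
  let parts := (PySem.Str.split? sanitized_name "_").getD []
  (pvProduct4 (parts.length - 1)).foldl
    (fun variants seps =>
      PySem.Set.add variants
        ((seps.zip parts.tail).foldl (fun s sp => s ++ (sp.1 ++ sp.2)) (parts.headD "")))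
    PySem.Set.empty

-- ===== PRECONDITION & SPEC =====
def Spec_generate_prefix_variants (sanitized_name : String) (out : List String) : Prop := out = generate_prefix_variants_alt sanitized_name
instance (sanitized_name : String) (out : List String) : Decidable (Spec_generate_prefix_variants sanitized_name out) := by unfold Spec_generate_prefix_variants; infer_instance

-- ===== CLAIM (what is proved, stated in full; the proofs are below) =====
def Claim_equal_generate_prefix_variants : Prop := ∀ (sanitized_name : String), Dom_generate_prefix_variants sanitized_name → Spec_generate_prefix_variants sanitized_name (generate_prefix_variants sanitized_name)

-- ===== LEMMAS AND PROOFS =====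

-- interleave separators with the remaining parts: [s1, p1, s2, p2, …]
def pvInter : List String → List String → List String
  | s :: ss, p :: ps => s :: p :: pvInter ss ps
  | _, _ => []

theorem pvJoin_empty_cons (a : String) (l : List String) :
    PySem.Str.join "" (a :: l) = a ++ PySem.Str.join "" l := by
  apply String.toList_inj.mp
  simp [PySem.Str.toList_join]
  cases l with
  | nil => simp [PySem.Chars.join_nil, PySem.Chars.join_singleton]
  | cons b t => simp [PySem.Chars.join_cons_cons]

theorem pvAlt_build (seps parts : List String) (a : String) :
    (seps.zip parts).foldl (fun s sp => s ++ (sp.1 ++ sp.2)) a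
      = PySem.Str.join "" (a :: pvInter seps parts) := by
  induction seps generalizing parts a with
  | nil => simp [pvInter, PySem.Str.join]
  | cons s ss ih =>
    cases parts with
    | nil => simp [pvInter, PySem.Str.join]
    | cons p ps =>
      simp only [List.zip_cons_cons, List.foldl_cons, ih, pvInter,
        pvJoin_empty_cons, String.append_assoc]

theorem pvHelperA_eq (rest path : List String) (acc : PySem.Set String) :
    pvHelperA rest path acc
      = ((pvProduct4 rest.length).map
          (fun seps => PySem.Str.join "" (path ++ pvInter seps rest))).foldl PySem.Set.add acc := by
  induction rest generalizing path acc with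
  | nil => simp [pvHelperA, pvProduct4, pvInter]
  | cons part rest ih =>
    simp only [pvHelperA, ih, List.length_cons, pvProduct4,
      List.flatMap_cons, List.flatMap_nil, List.map_append, List.map_map,
      List.foldl_append, List.append_nil]
    simp [Function.comp_def, pvInter, List.append_assoc]

-- ===== VERDICT (by name: the statement is the Claim_ definition above) =====
theorem generate_prefix_variants_spec : Claim_equal_generate_prefix_variants := by
  intro s _
  show generate_prefix_variants s = generate_prefix_variants_alt s
  unfold generate_prefix_variants generate_prefix_variants_alt
  cases h : (PySem.Str.split? s "_").getD [] with
  | nil => simp [pvHelperA, pvProduct4, PySem.Str.join]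
  | cons p0 rest =>
    simp only [pvHelperA_eq, List.length_cons, Nat.add_sub_cancel,
      List.tail_cons, List.headD_cons, List.foldl_map]
    congr 1
    funext v seps
    rw [pvAlt_build]
    simp [pvJoin_empty_cons]
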